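-- pv_equiv track=rewrite | github.com/ichal6/Music-Library-ProgBasic3-TW | music_reports.py | length_of_albums
-- ===== SOURCE A (Python) =====
-- def length_of_albums(list_albums, kind):  # chcecks the length of columns
--     length = [0, 0, 0, 0, 0]
--     col = 0
--     while col < 5:
--         for album in list_albums:
--             if len(album[col]) > length[col]:
--                 if album[0].lower() == kind.lower():
--                     length[col] = len(album[col])
--                 elif album[1].lower() == kind.lower():
--                     length[col] = len(album[col])
--                 elif album[2].lower() == kind.lower():
--                     length[col] = len(album[col])
--                 elif album[3].lower() == kind.lower():
--                     length[col] = len(album[col])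
--                 elif album[4].lower() == kind.lower():
--                     length[col] = len(album[col])
--                 elif "empty" == kind:
--                     length[col] = len(album[col])
--         col += 1
--     return length  # returns value for print table
-- ===== SOURCE B (Python) =====
-- def length_of_albums(list_albums, kind):
--     k = kind.lower()
--     matching = [a for a in list_albums
--                 if k in (a[0].lower(), a[1].lower(), a[2].lower(),
--                          a[3].lower(), a[4].lower())
--                 or kind == "empty"]
--     return [max((len(a[col]) for a in matching), default=0) for col in range(5)]
-- ===== Notes on version B (the rewrite author's own statement) =====
-- stated objective: alternative
-- what changed: Instead of A's five column passes mutating a length array under a repeated elif match chain, B first filters the albums matching the kind (a membership test on the lowered fields) and then builds the result as a per-column max(..., default=0) over that filtered list.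
-- outside the precondition, e.g. on length_of_albums([['rock']], 'rock'): A raises IndexError, B raises IndexError
import Mathlib
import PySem

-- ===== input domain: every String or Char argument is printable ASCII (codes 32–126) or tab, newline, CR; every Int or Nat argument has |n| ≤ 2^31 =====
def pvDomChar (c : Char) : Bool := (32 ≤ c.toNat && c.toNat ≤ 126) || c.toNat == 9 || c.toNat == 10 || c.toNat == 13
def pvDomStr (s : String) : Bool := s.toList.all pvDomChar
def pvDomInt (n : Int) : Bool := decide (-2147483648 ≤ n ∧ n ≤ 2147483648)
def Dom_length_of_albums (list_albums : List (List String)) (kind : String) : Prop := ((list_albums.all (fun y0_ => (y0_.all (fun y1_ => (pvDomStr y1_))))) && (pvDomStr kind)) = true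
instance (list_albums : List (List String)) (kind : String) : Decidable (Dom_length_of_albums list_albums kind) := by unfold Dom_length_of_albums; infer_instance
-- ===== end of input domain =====

-- B filters the kind-matching albums once, then takes each column's max(len, default=0) over that
-- filtered list, instead of A's five column passes mutating a length array under an elif chain.


-- ===== PORT A =====
-- album[col] is ported as List.getD: Pre_ guarantees every album has ≥ 5 entries, so the
-- index is in range and getD equals Python indexing; inputs with a short album (where the
-- Python raises IndexError) are excluded by Pre_.
-- the body of the 'for album' loop at one column
def aStep (kind : String) (col : Nat) (length : List Int) (album : List String) : List Int :=
  if PySem.Str.len (album.getD col "") > length.getD col 0 then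
    if PySem.Str.lower (album.getD 0 "") = PySem.Str.lower kind then
      length.set col (PySem.Str.len (album.getD col ""))
    else if PySem.Str.lower (album.getD 1 "") = PySem.Str.lower kind then
      length.set col (PySem.Str.len (album.getD col ""))
    else if PySem.Str.lower (album.getD 2 "") = PySem.Str.lower kind then
      length.set col (PySem.Str.len (album.getD col ""))
    else if PySem.Str.lower (album.getD 3 "") = PySem.Str.lower kind then
      length.set col (PySem.Str.len (album.getD col ""))
    else if PySem.Str.lower (album.getD 4 "") = PySem.Str.lower kind then
      length.set col (PySem.Str.len (album.getD col ""))
    else if "empty" = kind then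
      length.set col (PySem.Str.len (album.getD col ""))
    else length
  else length

-- 'while col < 5' with 'col += 1' visits col = 0,1,2,3,4
def length_of_albums (list_albums : List (List String)) (kind : String) : List Int :=
  ([0, 1, 2, 3, 4] : List Nat).foldl
    (fun length col => list_albums.foldl (aStep kind col) length)
    [0, 0, 0, 0, 0]

-- ===== PORT B =====
-- Source B's filter condition: 'k in (a[0].lower(), …, a[4].lower()) or kind == "empty"';
-- tuple membership is ported exactly as the or-chain of the five equality tests.
def bMatch (kind : String) (a : List String) : Bool :=
  (PySem.Str.lower (a.getD 0 "") == PySem.Str.lower kind) ||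
  (PySem.Str.lower (a.getD 1 "") == PySem.Str.lower kind) ||
  (PySem.Str.lower (a.getD 2 "") == PySem.Str.lower kind) ||
  (PySem.Str.lower (a.getD 3 "") == PySem.Str.lower kind) ||
  (PySem.Str.lower (a.getD 4 "") == PySem.Str.lower kind) ||
  (kind == "empty")

-- max(generator, default=0) is PySem.List.maxD with identity key
def length_of_albums_alt (list_albums : List (List String)) (kind : String) : List Int :=
  let matching := list_albums.filter (bMatch kind)
  (List.range 5).map (fun col =>
    PySem.List.maxD (matching.map (fun a => PySem.Str.len (a.getD col ""))) (fun x => x) 0)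

-- ===== PRECONDITION & SPEC =====
-- Pre_ excludes exactly the inputs where the Python raises IndexError: some album with
-- fewer than 5 fields (both A and B index album[0..4] on every album).
def Pre_length_of_albums (list_albums : List (List String)) (kind : String) : Prop :=
  ∀ a ∈ list_albums, 5 ≤ a.length
instance (list_albums : List (List String)) (kind : String) : Decidable (Pre_length_of_albums list_albums kind) := by unfold Pre_length_of_albums; infer_instance

def pvWitness_length_of_albums : List (List String) × String :=
  ([["rock", "a", "bb", "ccc", "dddd"], ["Rock", "x", "y", "z", "w"]], "ROCK")

def Spec_length_of_albums (list_albums : List (List String)) (kind : String) (out : List Int) : Prop := out = length_of_albums_alt list_albums kind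
instance (list_albums : List (List String)) (kind : String) (out : List Int) : Decidable (Spec_length_of_albums list_albums kind out) := by unfold Spec_length_of_albums; infer_instance

-- ===== CLAIM (what is proved, stated in full; the proofs are below) =====
def Claim_equal_length_of_albums : Prop := ∀ (list_albums : List (List String)) (kind : String), Dom_length_of_albums list_albums kind → Pre_length_of_albums list_albums kind → Spec_length_of_albums list_albums kind (length_of_albums list_albums kind)

-- ===== LEMMAS AND PROOFS =====

-- the per-cell update A performs at column col (A's nested elif chain, as a scalar)
def sA (kind : String) (album : List String) (col : Nat) (x : Int) : Int :=
  if PySem.Str.len (album.getD col "") > x then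
    if PySem.Str.lower (album.getD 0 "") = PySem.Str.lower kind then PySem.Str.len (album.getD col "")
    else if PySem.Str.lower (album.getD 1 "") = PySem.Str.lower kind then PySem.Str.len (album.getD col "")
    else if PySem.Str.lower (album.getD 2 "") = PySem.Str.lower kind then PySem.Str.len (album.getD col "")
    else if PySem.Str.lower (album.getD 3 "") = PySem.Str.lower kind then PySem.Str.len (album.getD col "")
    else if PySem.Str.lower (album.getD 4 "") = PySem.Str.lower kind then PySem.Str.len (album.getD col "")
    else if "empty" = kind then PySem.Str.len (album.getD col "")
    else x
  else x

-- the elif chain over abstract propositions (applied in sA_eq_max)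
lemma chain_max (p0 p1 p2 p3 p4 pe : Prop) [Decidable p0] [Decidable p1] [Decidable p2]
    [Decidable p3] [Decidable p4] [Decidable pe] (v x : Int) :
    (if v > x then
      if p0 then v else if p1 then v else if p2 then v else if p3 then v
      else if p4 then v else if pe then v else x
     else x)
    = if ((((p0 ∨ p1) ∨ p2) ∨ p3) ∨ p4) ∨ pe then max x v else x := by
  split_ifs <;> first | omega | tauto

-- A's scalar step is 'max with the length when the album matches'
lemma sA_eq_max (kind : String) (album : List String) (col : Nat) (x : Int) :
    sA kind album col x
      = if bMatch kind album then max x (PySem.Str.len (album.getD col "")) else x := by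
  simp only [sA, bMatch, Bool.or_eq_true, beq_iff_eq, @eq_comm String kind "empty"]
  apply chain_max

lemma aStep_eq_set (kind : String) (col : Nat) (l : List Int) (album : List String)
    (h : col < l.length) :
    aStep kind col l album = l.set col (sA kind album col (l.getD col 0)) := by
  have hl : l.getD col 0 = l[col] := List.getD_eq_getElem l 0 h
  simp only [aStep, sA, hl]
  split_ifs <;> simp [List.set_getElem_self]

lemma foldl_aStep (kind : String) (col : Nat) (albums : List (List String))
    (l : List Int) (h : col < l.length) :
    albums.foldl (aStep kind col) l
      = l.set col (albums.foldl (fun x alb => sA kind alb col x) (l.getD col 0)) := by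
  induction albums generalizing l with
  | nil =>
      rw [List.foldl_nil, List.foldl_nil, List.getD_eq_getElem l 0 h, List.set_getElem_self h]
  | cons alb rest ih =>
      have hset : col < (l.set col (sA kind alb col (l.getD col 0))).length := by simpa using h
      have h2 : (l.set col (sA kind alb col (l.getD col 0))).getD col 0
          = sA kind alb col (l.getD col 0) := by simp [h]
      rw [List.foldl_cons, aStep_eq_set kind col l alb h, ih _ hset, h2, List.set_set,
          List.foldl_cons]

-- A's per-column scalar fold is a running max over the FILTERED albums' lengths
lemma foldl_sA_eq_filter (kind : String) (albums : List (List String)) (col : Nat) (x : Int) :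
    albums.foldl (fun y alb => sA kind alb col y) x
      = ((albums.filter (bMatch kind)).map (fun a => PySem.Str.len (a.getD col ""))).foldl max x := by
  induction albums generalizing x with
  | nil => rfl
  | cons alb rest ih =>
      rw [List.foldl_cons, sA_eq_max, List.filter_cons]
      by_cases h : bMatch kind alb
      · rw [if_pos h, if_pos h, List.map_cons, List.foldl_cons, ih]
      · rw [if_neg h, if_neg h, ih]

-- max(list-of-string-lengths, default=0) as the running max from 0
lemma maxD_lens (ms : List (List String)) (col : Nat) :
    PySem.List.maxD (ms.map (fun a => PySem.Str.len (a.getD col ""))) (fun x => x) 0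
      = (ms.map (fun a => PySem.Str.len (a.getD col ""))).foldl max 0 := by
  cases ms with
  | nil => rfl
  | cons m t =>
      rw [List.map_cons]
      have h0 : (0 : Int) ≤ PySem.Str.len (m.getD col "") := by
        simp [PySem.Str.len]
      rw [PySem.List.maxD, PySem.List.max?_id_cons, Option.getD_some, List.foldl_cons,
          max_eq_right h0]

lemma aCol0 (kind : String) (albums : List (List String)) (a b c d e : Int) :
    albums.foldl (aStep kind 0) [a, b, c, d, e]
      = [albums.foldl (fun x alb => sA kind alb 0 x) a, b, c, d, e] := by
  rw [foldl_aStep kind 0 albums [a, b, c, d, e] (by simp)]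
  simp [List.set, List.getD]

lemma aCol1 (kind : String) (albums : List (List String)) (a b c d e : Int) :
    albums.foldl (aStep kind 1) [a, b, c, d, e]
      = [a, albums.foldl (fun x alb => sA kind alb 1 x) b, c, d, e] := by
  rw [foldl_aStep kind 1 albums [a, b, c, d, e] (by simp)]
  simp [List.set, List.getD]

lemma aCol2 (kind : String) (albums : List (List String)) (a b c d e : Int) :
    albums.foldl (aStep kind 2) [a, b, c, d, e]
      = [a, b, albums.foldl (fun x alb => sA kind alb 2 x) c, d, e] := by
  rw [foldl_aStep kind 2 albums [a, b, c, d, e] (by simp)]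
  simp [List.set, List.getD]

lemma aCol3 (kind : String) (albums : List (List String)) (a b c d e : Int) :
    albums.foldl (aStep kind 3) [a, b, c, d, e]
      = [a, b, c, albums.foldl (fun x alb => sA kind alb 3 x) d, e] := by
  rw [foldl_aStep kind 3 albums [a, b, c, d, e] (by simp)]
  simp [List.set, List.getD]

lemma aCol4 (kind : String) (albums : List (List String)) (a b c d e : Int) :
    albums.foldl (aStep kind 4) [a, b, c, d, e]
      = [a, b, c, d, albums.foldl (fun x alb => sA kind alb 4 x) e] := by
  rw [foldl_aStep kind 4 albums [a, b, c, d, e] (by simp)]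
  simp [List.set, List.getD]

-- ===== VERDICT (by name: the statement is the Claim_ definition above) =====
theorem length_of_albums_spec : Claim_equal_length_of_albums := by
  intro list_albums kind _ _
  show length_of_albums list_albums kind = length_of_albums_alt list_albums kind
  unfold length_of_albums length_of_albums_alt
  simp only [List.foldl_cons, List.foldl_nil]
  rw [aCol0, aCol1, aCol2, aCol3, aCol4]
  simp only [List.range_succ, List.range_zero, List.nil_append, List.cons_append, List.map_cons,
    List.map_nil, maxD_lens]
  simp only [foldl_sA_eq_filter]
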